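-- pv_equiv track=rewrite | github.com/opkwisdom/IR-REPO | repo/sentence-transformer/src/indexing.py | get_shards
-- ===== SOURCE A (Python) =====
-- from typing import Dict, Union, List, Tuple
--
-- def get_shards(collection: Dict[str, Dict[str, str]], num_shards: int) -> List[Dict[str, Dict[str, str]]]:
--     all_pids = list(collection.keys())
--     shard_size = len(all_pids) // num_shards
--     shards = []
--     for i in range(num_shards):
--         start = i * shard_size
--         # 마지막 샤드는 남은 데이터를 모두 포함
--         end = (i + 1) * shard_size if i < num_shards - 1 else len(all_pids)
--         shard_pids = all_pids[start:end]
--         shards.append({pid: collection[pid] for pid in shard_pids})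
--     return shards
-- ===== SOURCE B (Python) =====
-- def get_shards(collection, num_shards):
--     shards = [dict() for _ in range(num_shards)]
--     if shards:
--         last = num_shards - 1
--         shard_size = len(collection) // num_shards
--         for idx, (pid, value) in enumerate(collection.items()):
--             target = last if shard_size == 0 else min(idx // shard_size, last)
--             shards[target][pid] = value
--     return shards
-- ===== Notes on version B (the rewrite author's own statement) =====
-- stated objective: alternative
-- what changed: Replaces the per-shard loop that slices the key list and rebuilds each sub-dict by lookups with a single pass over enumerate(collection.items()) that routes each item directly to its target shard by index arithmetic.
-- crash fix: When num_shards == 0 A raises ZeroDivisionError at the shard_size computation; B returns the empty list of shards. — e.g. on get_shards([("a", [("x", "y")])], 0): A raises ZeroDivisionError, B returns []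
import Mathlib
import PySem

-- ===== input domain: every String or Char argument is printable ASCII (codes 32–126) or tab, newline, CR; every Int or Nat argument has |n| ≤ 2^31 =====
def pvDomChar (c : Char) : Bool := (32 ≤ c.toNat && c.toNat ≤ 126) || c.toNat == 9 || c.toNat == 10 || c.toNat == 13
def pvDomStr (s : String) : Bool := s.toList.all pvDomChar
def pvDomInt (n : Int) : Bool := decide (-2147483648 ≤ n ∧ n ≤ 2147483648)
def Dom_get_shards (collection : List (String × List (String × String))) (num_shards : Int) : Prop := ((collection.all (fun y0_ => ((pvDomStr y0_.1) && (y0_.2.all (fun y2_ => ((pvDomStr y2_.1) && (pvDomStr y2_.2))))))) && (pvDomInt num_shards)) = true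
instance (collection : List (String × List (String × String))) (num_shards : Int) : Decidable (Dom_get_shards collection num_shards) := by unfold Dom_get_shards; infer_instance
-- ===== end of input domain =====

-- B replaces A's per-shard key-list slicing and dict rebuilding by one pass over enumerate(items)
-- routing each item to its target shard (alternative decomposition, same cost).


-- ===== PORT A =====
-- literal transliteration of A; the dict parameter is interpreted with Python dict semantics
-- (PySem.Dict.ofList); collection[pid] is ported as getD (pid is always a key, so exact).
def get_shards (collection : List (String × List (String × String))) (num_shards : Int) : List (List (String × List (String × String))) :=
  let d := PySem.Dict.ofList collection
  let all_pids := d.keys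
  let shard_size := PySem.Int.floordiv (all_pids.length : Int) num_shards
  let shards := (PySem.List.pyRange 0 num_shards 1).foldl (fun shards i =>
    let start := i * shard_size
    let stop := if i < num_shards - 1 then (i + 1) * shard_size else (all_pids.length : Int)
    let shard_pids := PySem.List.slice all_pids (some start) (some stop)
    shards ++ [shard_pids.foldl
      (fun sd pid => sd.insert pid (d.getD pid [])) PySem.Dict.empty]) []
  shards.map (fun sd => sd.items)

-- ===== PORT B =====
-- literal transliteration of Source B; shards[target] indexing is always in range (0 ≤ target < num_shards).
def get_shards_alt (collection : List (String × List (String × String))) (num_shards : Int) : List (List (String × List (String × String))) :=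
  let d := PySem.Dict.ofList collection
  let shards := (PySem.List.pyRange 0 num_shards 1).map
    (fun _ => (PySem.Dict.empty : PySem.Dict String (List (String × String))))
  if shards.isEmpty then []
  else
    let last := num_shards - 1
    let shard_size := PySem.Int.floordiv (d.size : Int) num_shards
    let final := (PySem.List.enumerate d.items 0).foldl (fun shards p =>
      let target := if shard_size = 0 then last else min (PySem.Int.floordiv p.1 shard_size) last
      shards.set target.toNat ((shards.getD target.toNat PySem.Dict.empty).insert p.2.1 p.2.2)) shards
    final.map (fun sd => sd.items)

-- ===== PRECONDITION & SPEC =====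
-- Pre_ excludes only num_shards = 0, where Python A raises ZeroDivisionError.
def Pre_get_shards (collection : List (String × List (String × String))) (num_shards : Int) : Prop := num_shards ≠ 0
instance (collection : List (String × List (String × String))) (num_shards : Int) : Decidable (Pre_get_shards collection num_shards) := by unfold Pre_get_shards; infer_instance
def pvWitness_get_shards : (List (String × List (String × String))) × Int := ([("a", [("x", "y")]), ("b", [])], 2)

-- When num_shards == 0 A raises ZeroDivisionError at the shard_size computation; B returns the empty list of shards.
def Raises_get_shards (collection : List (String × List (String × String))) (num_shards : Int) : Prop := num_shards = 0
instance (collection : List (String × List (String × String))) (num_shards : Int) : Decidable (Raises_get_shards collection num_shards) := by unfold Raises_get_shards; infer_instance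
def pvRaiseWitness_get_shards : (List (String × List (String × String))) × Int := ([("a", [("x", "y")])], 0)
def pvRaiseWitnessOut_get_shards : List (List (String × List (String × String))) := []

def Spec_get_shards (collection : List (String × List (String × String))) (num_shards : Int) (out : List (List (String × List (String × String)))) : Prop := out = get_shards_alt collection num_shards
instance (collection : List (String × List (String × String))) (num_shards : Int) (out : List (List (String × List (String × String)))) : Decidable (Spec_get_shards collection num_shards out) := by unfold Spec_get_shards; infer_instance

-- ===== CLAIM (what is proved, stated in full; the proofs are below) =====
def Claim_equal_get_shards : Prop := ∀ (collection : List (String × List (String × String))) (num_shards : Int), Dom_get_shards collection num_shards → Pre_get_shards collection num_shards → Spec_get_shards collection num_shards (get_shards collection num_shards)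
def Claim_raises_get_shards : Prop := (∀ (collection : List (String × List (String × String))) (num_shards : Int), Dom_get_shards collection num_shards → Raises_get_shards collection num_shards → ¬ Pre_get_shards collection num_shards) ∧ (Dom_get_shards (pvRaiseWitness_get_shards.1) (pvRaiseWitness_get_shards.2) ∧ Raises_get_shards (pvRaiseWitness_get_shards.1) (pvRaiseWitness_get_shards.2) ∧ get_shards_alt (pvRaiseWitness_get_shards.1) (pvRaiseWitness_get_shards.2) = pvRaiseWitnessOut_get_shards)

-- ===== LEMMAS AND PROOFS =====

-- interval filter lemma
theorem filt_interval {γ : Type} (a b : ℕ) : ∀ (L : List γ) (st : ℕ),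
    ((PySem.List.enumerate L (st:Int)).filter
        (fun p => decide ((a:Int) ≤ p.1 ∧ p.1 < (b:Int)))).map (fun p => p.2)
      = (L.take (b - st)).drop (a - st) := by
  intro L
  induction L with
  | nil => intro st; simp [PySem.List.enumerate]
  | cons x L ih =>
    intro st
    rw [PySem.List.enumerate_cons]
    have h1 : ((st:Int) + 1) = ((st + 1 : ℕ) : Int) := by push_cast; ring
    by_cases ha : a ≤ st
    · by_cases hb : st < b
      · have : (decide ((a:Int) ≤ (st:Int) ∧ (st:Int) < (b:Int))) = true := by
          simp; constructor <;> [exact_mod_cast ha; exact_mod_cast hb]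
        rw [List.filter_cons_of_pos (by simpa using this)]
        simp only [List.map_cons]
        rw [h1, ih (st + 1)]
        have h2 : a - st = 0 := by omega
        have h3 : a - (st + 1) = 0 := by omega
        have h4 : b - st = (b - (st+1)) + 1 := by omega
        rw [h2, h3, h4]
        simp [List.take_succ_cons]
      · have : (decide ((a:Int) ≤ (st:Int) ∧ (st:Int) < (b:Int))) = false := by
          simp; intro _; omega
        rw [List.filter_cons_of_neg (by simpa using this)]
        rw [h1, ih (st + 1)]
        have h2 : b - st = 0 := by omega
        have h3 : b - (st + 1) = 0 := by omega
        rw [h2, h3]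
        simp
    · have : (decide ((a:Int) ≤ (st:Int) ∧ (st:Int) < (b:Int))) = false := by
        simp; intro h; omega
      rw [List.filter_cons_of_neg (by simpa using this)]
      rw [h1, ih (st + 1)]
      by_cases hb : st < b
      · have h2 : a - st = (a - (st+1)) + 1 := by omega
        have h4 : b - st = (b - (st+1)) + 1 := by omega
        rw [h2, h4]
        simp [List.take_succ_cons]
      · have h2 : b - st = 0 := by omega
        have h3 : b - (st + 1) = 0 := by omega
        rw [h2, h3]; simp

theorem getD_set_ne {δ : Type} (T : List δ) (i j : ℕ) (x d : δ) (h : i ≠ j) :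
    (T.set i x).getD j d = T.getD j d := by
  by_cases hj : j < T.length
  · rw [List.getD_eq_getElem _ _ (by simpa using hj), List.getD_eq_getElem _ _ hj,
      List.getElem_set_ne (by omega)]
  · rw [List.getD_eq_default _ _ (by simpa using hj), List.getD_eq_default _ _ (by omega)]

theorem getD_set_self {δ : Type} (T : List δ) (i : ℕ) (x d : δ) (h : i < T.length) :
    (T.set i x).getD i d = x := by
  rw [List.getD_eq_getElem _ _ (by simpa using h), List.getElem_set_self]

theorem length_foldl_set {γ δ : Type} (g : List δ → γ → ℕ) (h : List δ → γ → δ) :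
    ∀ (M : List γ) (T : List δ),
      (M.foldl (fun T p => T.set (g T p) (h T p)) T).length = T.length := by
  intro M
  induction M with
  | nil => intro T; rfl
  | cons y M ih => intro T; rw [List.foldl_cons, ih]; simp

theorem map_eq_range_getD {γ δ : Type} (l : List γ) (g : γ → δ) (dflt : γ) :
    l.map g = (List.range l.length).map (fun j => g (l.getD j dflt)) := by
  apply List.ext_getElem
  · simp
  · intro j h1 h2
    simp only [List.getElem_map, List.getElem_range]
    rw [List.getD_eq_getElem _ _ (by simpa using h1)]

theorem distrib_foldl (f : Int → ℕ) (j : ℕ) :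
    ∀ (M : List (String × List (String × String))) (st : Int)
      (T : List (PySem.Dict String (List (String × String)))),
      (M.map Prod.fst).Nodup →
      (∀ p ∈ M, ∀ B ∈ T, B.contains p.1 = false) →
      j < T.length →
      (((PySem.List.enumerate M st).foldl
          (fun T p => T.set (f p.1) ((T.getD (f p.1) PySem.Dict.empty).insert p.2.1 p.2.2)) T).getD
            j PySem.Dict.empty).items
        = (T.getD j PySem.Dict.empty).items
          ++ ((PySem.List.enumerate M st).filter (fun p => decide (f p.1 = j))).map (fun p => p.2) := by
  intro M
  induction M with
  | nil => intro st T _ _ _; simp [PySem.List.enumerate]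
  | cons x M ih =>
    intro st T hnd hfresh hj
    rw [PySem.List.enumerate_cons, List.foldl_cons]
    set newB := ((T.getD (f st) PySem.Dict.empty).insert x.1 x.2) with hnewB
    set T' := T.set (f st) newB with hT'
    have hlen' : T'.length = T.length := by simp [hT']
    have hcons : (x.1 :: M.map Prod.fst).Nodup := by
      rw [← List.map_cons]; exact hnd
    have hndM : (M.map Prod.fst).Nodup := hcons.of_cons
    have hx1 : x.1 ∉ M.map Prod.fst := (List.nodup_cons.mp hcons).1
    have hfresh' : ∀ p ∈ M, ∀ B ∈ T', B.contains p.1 = false := by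
      intro p hp B hB
      rcases List.mem_or_eq_of_mem_set hB with hB' | rfl
      · exact hfresh p (List.mem_cons_of_mem _ hp) B hB'
      · rw [hnewB, PySem.Dict.contains_insert]
        have h1 : (p.1 == x.1) = false := by
          simp only [beq_eq_false_iff_ne]
          intro he
          exact hx1 (he ▸ List.mem_map_of_mem hp)
        rw [h1, Bool.false_or]
        by_cases hlt : f st < T.length
        · exact hfresh p (List.mem_cons_of_mem _ hp) _
            (by rw [List.getD_eq_getElem _ _ hlt]; exact List.getElem_mem hlt)
        · rw [List.getD_eq_default _ _ (by omega)]
          exact PySem.Dict.contains_empty _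
    have ihres := ih (st + 1) T' hndM hfresh' (by omega)
    rw [ihres]
    by_cases hfj : f st = j
    · have hflt : f st < T.length := hfj ▸ hj
      rw [List.filter_cons_of_pos (by simp [hfj])]
      rw [hT', hfj, getD_set_self T j newB PySem.Dict.empty hj]
      rw [hnewB, hfj, PySem.Dict.items_insert_of_not_contains]
      · simp
      · by_cases hlt : j < T.length
        · exact hfresh x (List.mem_cons_self) _
            (by rw [List.getD_eq_getElem _ _ hlt]; exact List.getElem_mem hlt)
        · omega
    · rw [List.filter_cons_of_neg (by simp [hfj])]
      rw [hT', getD_set_ne T (f st) j newB PySem.Dict.empty hfj]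

-- Nat-level target characterisation
theorem tgt_iff (N len s m j : ℕ) (hN : 0 < N) (hs : s = len / N) (hm : m < len) (hj : j < N) :
    ((if s = 0 then N - 1 else min (m / s) (N - 1)) = j) ↔
      (j * s ≤ m ∧ m < (if j < N - 1 then (j + 1) * s else len)) := by
  by_cases h0 : s = 0
  · subst h0
    by_cases hjl : j < N - 1 <;> simp [hjl] <;> omega
  · have hspos : 0 < s := Nat.pos_of_ne_zero h0
    rw [if_neg h0]
    by_cases hjl : j < N - 1
    · rw [if_pos hjl]
      constructor
      · intro h
        have hdiv : m / s = j := by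
          rcases Nat.lt_or_ge (m / s) (N - 1) with hc | hc
          · omega
          · omega
        constructor
        · calc j * s = m / s * s := by rw [hdiv]
            _ ≤ m := Nat.div_mul_le_self m s
        · have h5 := Nat.div_add_mod m s
          rw [hdiv] at h5
          have h6 := Nat.mod_lt m hspos
          have hexp : (j + 1) * s = s * j + s := by ring
          rw [hexp]
          linarith
      · intro ⟨h1, h2⟩
        have : m / s = j := Nat.div_eq_of_lt_le h1 h2
        omega
    · rw [if_neg hjl]
      have hj' : j = N - 1 := by omega
      subst hj'
      constructor
      · intro h
        refine ⟨?_, hm⟩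
        have : N - 1 ≤ m / s := by omega
        calc (N - 1) * s ≤ m / s * s := Nat.mul_le_mul_right s this
          _ ≤ m := Nat.div_mul_le_self m s
      · intro ⟨h1, _⟩
        have : N - 1 ≤ m / s := (Nat.le_div_iff_mul_le hspos).mpr h1
        omega

theorem comp_items (d : PySem.Dict String (List (String × String))) (pids : List String)
    (h : pids.Nodup) :
    (pids.foldl (fun sd pid => sd.insert pid (d.getD pid [])) PySem.Dict.empty).items
      = pids.map (fun pid => (pid, d.getD pid [])) := by
  have := PySem.Dict.items_foldl_insert_fresh pids (fun pid => pid)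
    (fun pid => d.getD pid []) PySem.Dict.empty
    (fun a _ => PySem.Dict.contains_empty a) (by simpa using h)
  simpa using this

theorem A_eq (collection : List (String × List (String × String))) (N : ℕ) (hN : 0 < N) :
    get_shards collection (N : Int) =
      (List.range N).map (fun k =>
        (((PySem.Dict.ofList collection).items.drop
            (k * ((PySem.Dict.ofList collection).items.length / N))).take
          ((if k < N - 1 then (k + 1) * ((PySem.Dict.ofList collection).items.length / N)
            else (PySem.Dict.ofList collection).items.length)
            - k * ((PySem.Dict.ofList collection).items.length / N)))) := by
  simp only [get_shards]
  set d := PySem.Dict.ofList collection with hd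
  set L := d.items with hL
  have hkeys : d.keys = L.map Prod.fst := rfl
  have hnd : (L.map Prod.fst).Nodup := by
    rw [← hkeys]; exact PySem.Dict.nodup_keys_ofList collection
  set len := L.length with hlen
  set s := len / N with hs
  have hlenk : d.keys.length = len := by rw [hkeys]; simp [hlen]
  rw [hlenk]
  rw [PySem.Int.floordiv_natCast len N]
  rw [PySem.List.foldl_append_singleton_eq_map]
  rw [List.nil_append, PySem.List.pyRange_zero_nat, List.map_map, List.map_map]
  apply List.map_congr_left
  intro k hk
  have hkN : k < N := List.mem_range.mp hk
  simp only [Function.comp]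
  -- resolve the if on Int vs the if on Nat
  by_cases hkl : k < N - 1
  · rw [if_pos (show (k : Int) < (N : Int) - 1 by omega)]
    have hc1 : (k : Int) * (s : Int) = ((k * s : ℕ) : Int) := by push_cast; ring
    have hc2 : ((k : Int) + 1) * (s : Int) = (((k + 1) * s : ℕ) : Int) := by push_cast; ring
    rw [hc1, hc2, PySem.List.slice_natCast]
    rw [hkeys, ← List.map_drop, ← List.map_take]
    rw [comp_items d _ (by
      apply List.Nodup.sublist _ hnd
      exact ((List.take_sublist ..).trans (List.drop_sublist ..)).map _)]
    rw [List.map_map, if_pos hkl]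
    have : ∀ p ∈ (L.drop (k * s)).take ((k + 1) * s - k * s),
        ((fun pid => (pid, d.getD pid [])) ∘ Prod.fst) p = p := by
      intro p hp
      have hpL : p ∈ L := ((List.take_sublist ..).trans (List.drop_sublist ..)).mem hp
      simp only [Function.comp]
      have : d.getD p.1 [] = p.2 :=
        PySem.Dict.getD_of_mem_items d hpL (by
          rw [hkeys]; exact hnd) []
      rw [this]
    rw [List.map_congr_left this, List.map_id']
  · rw [if_neg (show ¬ ((k : Int) < (N : Int) - 1) by omega)]
    have hc1 : (k : Int) * (s : Int) = ((k * s : ℕ) : Int) := by push_cast; ring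
    rw [hc1, PySem.List.slice_natCast]
    rw [hkeys, ← List.map_drop, ← List.map_take]
    rw [comp_items d _ (by
      apply List.Nodup.sublist _ hnd
      exact ((List.take_sublist ..).trans (List.drop_sublist ..)).map _)]
    rw [List.map_map, if_neg hkl]
    have : ∀ p ∈ (L.drop (k * s)).take (len - k * s),
        ((fun pid => (pid, d.getD pid [])) ∘ Prod.fst) p = p := by
      intro p hp
      have hpL : p ∈ L := ((List.take_sublist ..).trans (List.drop_sublist ..)).mem hp
      simp only [Function.comp]
      have : d.getD p.1 [] = p.2 :=
        PySem.Dict.getD_of_mem_items d hpL (by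
          rw [hkeys]; exact hnd) []
      rw [this]
    rw [List.map_congr_left this, List.map_id']

theorem B_eq (collection : List (String × List (String × String))) (N : ℕ) (hN : 0 < N) :
    get_shards_alt collection (N : Int) =
      (List.range N).map (fun j =>
        ((PySem.List.enumerate (PySem.Dict.ofList collection).items 0).filter
          (fun p => decide
            ((if (((PySem.Dict.ofList collection).items.length / N : ℕ) : Int) = 0
                then (N : Int) - 1
                else min (PySem.Int.floordiv p.1
                    (((PySem.Dict.ofList collection).items.length / N : ℕ) : Int)) ((N : Int) - 1)).toNat
              = j))).map (fun p => p.2)) := by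
  simp only [get_shards_alt]
  set d := PySem.Dict.ofList collection with hd
  set L := d.items with hL
  have hnd : (L.map Prod.fst).Nodup := PySem.Dict.nodup_keys_ofList collection
  have hsize : d.size = L.length := rfl
  rw [hsize, PySem.Int.floordiv_natCast L.length N]
  rw [PySem.List.pyRange_zero_nat]
  have hne : ((List.map (fun k : ℕ => (k : Int)) (List.range N)).map
      (fun _ => (PySem.Dict.empty : PySem.Dict String (List (String × String))))).isEmpty = false := by
    simp [List.range_eq_nil]; omega
  simp only [hne, Bool.false_eq_true, if_false]
  set tF : Int → ℕ := fun i =>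
    (if ((L.length / N : ℕ) : Int) = 0 then (N : Int) - 1
      else min (PySem.Int.floordiv i ((L.length / N : ℕ) : Int)) ((N : Int) - 1)).toNat with htF
  set T0 := (List.map (fun k : ℕ => (k : Int)) (List.range N)).map
      (fun _ => (PySem.Dict.empty : PySem.Dict String (List (String × String)))) with hT0
  have hT0len : T0.length = N := by simp [hT0]
  have step_eq :
      (fun (shards : List (PySem.Dict String (List (String × String))))
          (p : Int × (String × List (String × String))) =>
        shards.set
          (if ((L.length / N : ℕ) : Int) = 0 then (N : Int) - 1
            else min (PySem.Int.floordiv p.1 ((L.length / N : ℕ) : Int)) ((N : Int) - 1)).toNat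
          ((shards.getD
            (if ((L.length / N : ℕ) : Int) = 0 then (N : Int) - 1
              else min (PySem.Int.floordiv p.1 ((L.length / N : ℕ) : Int)) ((N : Int) - 1)).toNat
            PySem.Dict.empty).insert p.2.1 p.2.2))
      = (fun T p => T.set (tF p.1) ((T.getD (tF p.1) PySem.Dict.empty).insert p.2.1 p.2.2)) := by
    rw [htF]
  rw [step_eq]
  set final := (PySem.List.enumerate L 0).foldl
    (fun T p => T.set (tF p.1) ((T.getD (tF p.1) PySem.Dict.empty).insert p.2.1 p.2.2)) T0
    with hfinal
  have hflen : final.length = N := by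
    rw [hfinal]
    have := length_foldl_set (fun (_ : List (PySem.Dict String (List (String × String)))) p => tF p.1)
      (fun T p => (T.getD (tF p.1) PySem.Dict.empty).insert p.2.1 p.2.2)
      (PySem.List.enumerate L 0) T0
    rw [this, hT0len]
  rw [map_eq_range_getD final (fun sd => sd.items) PySem.Dict.empty, hflen]
  apply List.map_congr_left
  intro j hj
  have hjN : j < N := List.mem_range.mp hj
  rw [hfinal, distrib_foldl tF j L 0 T0 hnd ?_ (by omega)]
  · have hT0j : T0.getD j PySem.Dict.empty = PySem.Dict.empty := by
      rw [hT0, List.getD_eq_getElem _ _ (by simpa using hjN)]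
      simp
    rw [hT0j]
    rfl
  · intro p _ B hB
    rw [hT0] at hB
    rcases List.mem_map.mp hB with ⟨_, _, rfl⟩
    exact PySem.Dict.contains_empty _

theorem AB_eq (collection : List (String × List (String × String))) (num_shards : Int)
    (h : num_shards ≠ 0) :
    get_shards collection num_shards = get_shards_alt collection num_shards := by
  rcases lt_or_gt_of_ne h with hneg | hpos
  · simp only [get_shards, get_shards_alt]
    rw [PySem.List.pyRange_one_eq_nil (by omega)]
    simp
  · obtain ⟨N, rfl⟩ : ∃ N : ℕ, num_shards = (N : Int) :=
      ⟨num_shards.toNat, (Int.toNat_of_nonneg (by omega)).symm⟩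
    have hN : 0 < N := by exact_mod_cast hpos
    rw [A_eq collection N hN, B_eq collection N hN]
    set d := PySem.Dict.ofList collection with hd
    set L := d.items with hL
    set len := L.length with hlen
    set s := len / N with hs
    apply List.map_congr_left
    intro j hj
    have hjN : j < N := List.mem_range.mp hj
    have hpred : ∀ p ∈ PySem.List.enumerate L 0,
        (decide ((if ((s : ℕ) : Int) = 0 then (N : Int) - 1
            else min (PySem.Int.floordiv p.1 ((s : ℕ) : Int)) ((N : Int) - 1)).toNat = j))
        = (decide (((j * s : ℕ) : Int) ≤ p.1 ∧
            p.1 < (((if j < N - 1 then (j + 1) * s else len) : ℕ) : Int))) := by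
      intro p hp
      rcases (PySem.List.mem_enumerate_iff _ _ _).mp hp with ⟨m, hm, rfl⟩
      simp only [zero_add]
      rw [decide_eq_decide]
      rw [PySem.Int.floordiv_natCast m s]
      rw [show ((N : Int) - 1) = ((N - 1 : ℕ) : Int) by omega]
      rw [← Nat.cast_min]
      have ht := tgt_iff N len s m j hN hs hm hjN
      by_cases hs0 : s = 0
      · rw [if_pos (show ((s : ℕ) : Int) = 0 by exact_mod_cast hs0)]
        rw [if_pos hs0] at ht
        rw [Int.toNat_natCast, ht]
        constructor
        · intro ⟨h1, h2⟩
          exact ⟨by exact_mod_cast h1, by exact_mod_cast h2⟩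
        · intro ⟨h1, h2⟩
          exact ⟨by exact_mod_cast h1, by exact_mod_cast h2⟩
      · rw [if_neg (show ¬ ((s : ℕ) : Int) = 0 by exact_mod_cast hs0)]
        rw [if_neg hs0] at ht
        rw [Int.toNat_natCast, ht]
        constructor
        · intro ⟨h1, h2⟩
          exact ⟨by exact_mod_cast h1, by exact_mod_cast h2⟩
        · intro ⟨h1, h2⟩
          exact ⟨by exact_mod_cast h1, by exact_mod_cast h2⟩
    rw [List.filter_congr hpred]
    have hfi := filt_interval (j * s) (if j < N - 1 then (j + 1) * s else len) L 0
    simp only [Nat.cast_zero, Nat.sub_zero] at hfi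
    rw [hfi, List.drop_take]

-- ===== VERDICT (by name: the statement is the Claim_ definition above) =====
theorem get_shards_spec : Claim_equal_get_shards := by
  intro collection num_shards _ hpre
  unfold Spec_get_shards
  exact AB_eq collection num_shards hpre
theorem get_shards_raises : Claim_raises_get_shards := by
  unfold Claim_raises_get_shards
  exact ⟨fun _ _ _ h hp => hp h, by decide⟩
-- self-check: the raise witness lies inside Raises_ and outside Pre_ (uses get_shards_raises)
theorem raise_witness_outside_pre_ok :
    ¬ Pre_get_shards pvRaiseWitness_get_shards.1 pvRaiseWitness_get_shards.2 := by
  have h := get_shards_raises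
  unfold Claim_raises_get_shards at h
  exact h.1 _ _ (by decide) (by decide)
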